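-- pv_equiv track=rewrite | github.com/YofaGh/MangaScraper | modules/Allmanga.py | rename_chapter
-- ===== SOURCE A (Python) =====
-- def rename_chapter(chapter):
--     tail = " Raw" if "raw" in chapter else ""
--     new_name = ""
--     reached_number = False
--     for ch in chapter:
--         if ch.isdigit():
--             new_name += ch
--             reached_number = True
--         elif ch in "-." and reached_number and new_name[-1] != ".":
--             new_name += "."
--     if not reached_number:
--         return chapter
--     new_name = new_name.rstrip(".")
--     try:
--         return f"Chapter {int(new_name):03d}{tail}"
--     except ValueError:
--         return f"Chapter {new_name.split('.', 1)[0].zfill(3)}.{new_name.split('.', 1)[1]}{tail}"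
-- ===== SOURCE B (Python) =====
-- def rename_chapter(chapter):
--     if not any(c.isdigit() for c in chapter):
--         return chapter
--     tail = " Raw" if "raw" in chapter else ""
--     # pass 1: keep digits, turn '-'/'.' into '.', drop everything else
--     raw = "".join(c if c.isdigit() else "." for c in chapter if c.isdigit() or c in "-.")
--     # pass 2: collapse runs of dots by dropping any dot whose predecessor is a dot
--     collapsed = raw[:1] + "".join(c for p, c in zip(raw, raw[1:]) if p != "." or c != ".")
--     name = collapsed.strip(".")
--     try:
--         return f"Chapter {int(name):03d}{tail}"
--     except ValueError:
--         head, rest = name.split(".", 1)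
--         return f"Chapter {head.zfill(3)}.{rest}{tail}"
-- ===== Notes on version B (the rewrite author's own statement) =====
-- stated objective: alternative
-- what changed: Replaces A's single stateful accumulation loop (building new_name while tracking reached_number and the last appended character) by two independent stateless passes: a map/filter of the input to a digits-and-dots string, then a collapse of adjacent dots using predecessor pairs (zip) plus a strip of boundary dots, with an up-front no-digit guard replacing A's post-loop check.
import Mathlib
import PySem

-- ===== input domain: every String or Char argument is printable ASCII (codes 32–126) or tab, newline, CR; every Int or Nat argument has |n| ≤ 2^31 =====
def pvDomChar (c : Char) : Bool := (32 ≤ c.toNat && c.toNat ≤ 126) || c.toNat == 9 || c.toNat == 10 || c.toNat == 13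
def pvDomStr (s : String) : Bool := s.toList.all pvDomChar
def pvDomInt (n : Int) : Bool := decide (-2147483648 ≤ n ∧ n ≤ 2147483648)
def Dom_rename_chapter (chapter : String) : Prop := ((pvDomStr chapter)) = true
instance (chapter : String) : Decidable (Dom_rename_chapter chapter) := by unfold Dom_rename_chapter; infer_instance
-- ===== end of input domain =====

-- B replaces A's single stateful accumulation loop by two independent stateless passes
-- (map/filter to digits-and-dots, then collapse adjacent dots via predecessor pairs) — objective: alternative decomposition, no speed claim.

-- ===== PORT A =====
-- the for-loop of A: state (new_name, reached_number)
def renameLoopA : List Char → List Char → Bool → List Char × Bool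
  | [], nn, reached => (nn, reached)
  | ch :: rest, nn, reached =>
    if PySem.Chars.isdigit ch then renameLoopA rest (nn ++ [ch]) true
    else if (ch = '-' ∨ ch = '.') ∧ reached = true ∧ PySem.List.pyGet? nn (-1) ≠ some '.' then
      renameLoopA rest (nn ++ ['.']) reached
    else renameLoopA rest nn reached

def rename_chapter (chapter : String) : String :=
  let cs := chapter.toList
  let tail := if PySem.Chars.isIn "raw".toList cs then " Raw".toList else []
  let st := renameLoopA cs [] false
  if st.2 = false then chapter
  else
    -- new_name.rstrip(".") : drop trailing '.' (hand port, exact: reverse, dropWhile, reverse)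
    let nn := ((st.1).reverse.dropWhile (fun c => c == '.')).reverse
    match PySem.Int.ofChars? nn with
    | some n =>
        -- f"Chapter {int(new_name):03d}{tail}": zero-pad str(n) to width 3
        String.mk ("Chapter ".toList ++ PySem.Chars.zfill (PySem.Int.toChars n) 3 ++ tail)
    | none =>
        -- ValueError branch: new_name.split('.', 1); indices 0 and 1 always exist here
        -- (int() only fails because nn contains a '.'), so the pyGetD defaults are unreachable
        let parts := (PySem.Chars.splitMax? nn ['.'] 1).getD []
        String.mk ("Chapter ".toList ++ PySem.Chars.zfill (PySem.List.pyGetD parts 0 []) 3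
                    ++ ['.'] ++ PySem.List.pyGetD parts 1 [] ++ tail)

-- ===== PORT B =====
def rename_chapter_alt (chapter : String) : String :=
  let cs := chapter.toList
  if !(cs.any PySem.Chars.isdigit) then chapter
  else
    let tail := if PySem.Chars.isIn "raw".toList cs then " Raw".toList else []
    -- pass 1: keep digits, turn '-'/'.' into '.', drop everything else
    let raw := (cs.filter (fun c => PySem.Chars.isdigit c || c = '-' || c = '.')).map
                 (fun c => if PySem.Chars.isdigit c then c else '.')
    -- pass 2: raw[:1] + the pairs (p, c) of zip(raw, raw[1:]) keeping c unless p and c are both dots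
    let collapsed := raw.take 1 ++
        ((raw.zip raw.tail).filterMap (fun pc => if pc.1 ≠ '.' ∨ pc.2 ≠ '.' then some pc.2 else none))
    let name := PySem.Chars.stripChars collapsed ['.']
    match PySem.Int.ofChars? name with
    | some n =>
        String.mk ("Chapter ".toList ++ PySem.Chars.zfill (PySem.Int.toChars n) 3 ++ tail)
    | none =>
        -- except branch: name.split('.', 1) into head/rest; both parts always exist here
        let parts := (PySem.Chars.splitMax? name ['.'] 1).getD []
        String.mk ("Chapter ".toList ++ PySem.Chars.zfill (PySem.List.pyGetD parts 0 []) 3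
                    ++ ['.'] ++ PySem.List.pyGetD parts 1 [] ++ tail)

-- ===== PRECONDITION & SPEC =====
def Spec_rename_chapter (chapter : String) (out : String) : Prop := out = rename_chapter_alt chapter
instance (chapter : String) (out : String) : Decidable (Spec_rename_chapter chapter out) := by unfold Spec_rename_chapter; infer_instance

-- ===== CLAIM (what is proved, stated in full; the proofs are below) =====
def Claim_equal_rename_chapter : Prop := ∀ (chapter : String), Dom_rename_chapter chapter → Spec_rename_chapter chapter (rename_chapter chapter)

-- ===== LEMMAS AND PROOFS =====

-- collapse relative to a previous character: drop a dot whose predecessor is a dot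
def colA : Char → List Char → List Char
  | _, [] => []
  | prev, c :: t => if prev = '.' ∧ c = '.' then colA prev t else c :: colA c t

-- pass 1 of B as a function
def rawOf (cs : List Char) : List Char :=
  (cs.filter (fun c => PySem.Chars.isdigit c || c = '-' || c = '.')).map
    (fun c => if PySem.Chars.isdigit c then c else '.')

theorem pyGet?_neg_one (xs : List Char) : PySem.List.pyGet? xs (-1) = xs.getLast? := by
  simp [PySem.List.pyGet?, PySem.List.pyIdx?]
  rcases xs with _ | ⟨h, t⟩
  · simp
  · simp [List.getLast?_eq_getElem?]

-- A's loop computes: new_name = (current new_name) ++ collapse of the raw image of the rest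
theorem renameLoopA_eq (rest : List Char) : ∀ (nn : List Char) (reached : Bool),
    reached = !nn.isEmpty →
    renameLoopA rest nn reached
      = (nn ++ colA (nn.getLastD '.') (rawOf rest), reached || rest.any PySem.Chars.isdigit) := by
  induction rest with
  | nil => intro nn reached hr; simp [renameLoopA, rawOf, colA]
  | cons ch rest ih =>
    intro nn reached hr
    by_cases hd : PySem.Chars.isdigit ch = true
    · have hch : ch ≠ '.' := by
        intro h; subst h; revert hd; decide
      rw [renameLoopA, if_pos hd, ih (nn ++ [ch]) true (by simp)]
      simp [rawOf, hd, hch, colA]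
    · have hraw : rawOf (ch :: rest) =
        (if ch = '-' ∨ ch = '.' then ['.'] else []) ++ rawOf rest := by
        by_cases hm : ch = '-' ∨ ch = '.'
        · rcases hm with h | h <;> subst h <;> simp [rawOf, hd]
        · push_neg at hm
          simp [rawOf, hd, hm.1, hm.2]
      rw [renameLoopA, if_neg hd]
      by_cases hc : (ch = '-' ∨ ch = '.') ∧ reached = true ∧ PySem.List.pyGet? nn (-1) ≠ some '.'
      · obtain ⟨hm, hre, hlast⟩ := hc
        have hne : nn ≠ [] := by
          intro h; subst h; rw [hre] at hr; simp at hr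
        have hlast' : nn.getLastD '.' ≠ '.' := by
          rw [pyGet?_neg_one] at hlast
          rw [List.getLast?_eq_some_getLast hne] at hlast
          rw [List.getLastD_eq_getLast?, List.getLast?_eq_some_getLast hne]
          simpa using hlast
        rw [if_pos ⟨hm, hre, hlast⟩, ih (nn ++ ['.']) reached (by simp [hre])]
        rw [hraw, if_pos hm]
        simp [hre, colA]
        intro h; rw [List.getLastD_eq_getLast?] at hlast'; exact absurd h hlast'
      · rw [if_neg hc, ih nn reached hr]
        by_cases hm : ch = '-' ∨ ch = '.'
        · -- blocked separator: reached = false (nn empty) or last is '.'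
          have h2 : ¬(reached = true ∧ PySem.List.pyGet? nn (-1) ≠ some '.') := fun h => hc ⟨hm, h⟩
          have hdot : nn.getLastD '.' = '.' := by
            by_cases hre : reached = true
            · have hlast : PySem.List.pyGet? nn (-1) = some '.' := by
                by_contra h; exact h2 ⟨hre, h⟩
              rw [pyGet?_neg_one] at hlast
              rw [List.getLastD_eq_getLast?, hlast]; rfl
            · have : nn = [] := by
                simp at hre; rw [hre] at hr; simpa using hr.symm
              simp [this]
          rw [hraw, if_pos hm]
          simp [colA, hd]
          intro h; rw [List.getLastD_eq_getLast?] at hdot; exact absurd hdot h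
        · rw [hraw, if_neg hm]
          have : PySem.Chars.isdigit ch = false := by simpa using hd
          simp [this]

theorem colA_dot_head (t : List Char) :
    (colA '.' t).dropWhile (fun c => c == '.') = colA '.' t := by
  induction t with
  | nil => simp [colA]
  | cons c t ih =>
    by_cases h : c = '.'
    · simp [colA, h, ih]
    · simp [colA, h]

-- B's zip-collapse equals colA
theorem zip_collapse_eq (p : Char) (l : List Char) :
    ((p :: l).zip l).filterMap (fun pc => if pc.1 ≠ '.' ∨ pc.2 ≠ '.' then some pc.2 else none)
      = colA p l := by
  induction l generalizing p with
  | nil => simp [colA]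
  | cons c t ih =>
    by_cases h : p = '.' ∧ c = '.'
    · simp only [List.zip_cons_cons, List.filterMap_cons]
      rw [if_neg (by tauto)]
      rw [colA, if_pos h, ih, h.1, h.2]
    · simp only [List.zip_cons_cons, List.filterMap_cons]
      rw [if_pos (by tauto)]
      rw [colA, if_neg h, ih]

theorem dropWhile_collapsed (raw : List Char) :
    (raw.take 1 ++ ((raw.zip raw.tail).filterMap
        (fun pc => if pc.1 ≠ '.' ∨ pc.2 ≠ '.' then some pc.2 else none))).dropWhile (fun c => c == '.')
      = colA '.' raw := by
  rcases raw with _ | ⟨h, t⟩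
  · simp [colA]
  · simp only [List.take, List.tail_cons, zip_collapse_eq]
    by_cases hh : h = '.'
    · subst hh
      simp only [List.cons_append, List.nil_append, List.dropWhile_cons]
      simp [colA, colA_dot_head]
    · simp [colA, hh]

-- ===== VERDICT (by name: the statement is the Claim_ definition above) =====
theorem name_eq (cs : List Char) :
    PySem.Chars.stripChars
      ((rawOf cs).take 1 ++ (((rawOf cs).zip (rawOf cs).tail).filterMap
        (fun pc => if pc.1 ≠ '.' ∨ pc.2 ≠ '.' then some pc.2 else none))) ['.']
      = ((colA '.' (rawOf cs)).reverse.dropWhile (fun c => c == '.')).reverse := by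
  have hq : (fun c : Char => List.contains ['.'] c) = (fun c : Char => c == '.') := by
    funext c
    by_cases h : c = '.' <;> simp [h]
  simp only [PySem.Chars.stripChars, hq]
  rw [dropWhile_collapsed]

theorem rename_chapter_spec : Claim_equal_rename_chapter := by
  intro chapter hdom
  show rename_chapter chapter = rename_chapter_alt chapter
  have hloop := renameLoopA_eq chapter.toList [] false rfl
  simp only [List.nil_append, List.getLastD_nil, Bool.false_or] at hloop
  have hname := name_eq chapter.toList
  simp only [rawOf] at hloop hname
  by_cases hAny : chapter.toList.any PySem.Chars.isdigit = true
  · simp only [rename_chapter, rename_chapter_alt, hloop, hname, hAny, Bool.not_true,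
      Bool.false_eq_true, if_false, Bool.true_eq_false]
  · have hAny' : chapter.toList.any PySem.Chars.isdigit = false := by simpa using hAny
    simp only [rename_chapter, rename_chapter_alt, hloop, hAny', Bool.not_false, if_true]
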